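-- pv_equiv track=rewrite | github.com/atikulmunna/ubl-broad-detection | utils/size_variant_detector.py | get_size_summary
-- ===== SOURCE A (Python) =====
-- from typing import List, Dict
-- from collections import defaultdict
--
-- def get_size_summary(detections: List[Dict]) -> Dict[str, Dict[str, int]]:
--     """
--     Create a summary of size variant counts keyed by class_name.
--
--     Returns:
--         Dict: {class_name: {size: count}}
--     """
--     summary = defaultdict(lambda: defaultdict(int))
--
--     for det in detections:
--         class_name = det.get("class_name", "unknown")
--         size = det.get("size_variant", "N/A")
--
--         if size == "N/A":
--             continue
--
--         summary[class_name][size] += 1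
--
--     return {k: dict(v) for k, v in summary.items()}
-- ===== SOURCE B (Python) =====
-- def get_size_summary(detections):
--     pairs = [(det.get("class_name", "unknown"), det.get("size_variant", "N/A"))
--              for det in detections]
--     pairs = [p for p in pairs if p[1] != "N/A"]
--     result = {}
--     for c in dict.fromkeys(c for c, _ in pairs):
--         sizes = [s for cc, s in pairs if cc == c]
--         result[c] = {s: sizes.count(s) for s in dict.fromkeys(sizes)}
--     return result
-- ===== Notes on version B (the rewrite author's own statement) =====
-- stated objective: alternative
-- what changed: B keeps no counting accumulator at all: it materialises the filtered (class, size) pair list, dedups classes in first-occurrence order, and for each class extracts its size sequence and computes each count with list.count over the deduped sizes — a dedup-and-count group-by instead of A's incrementally updated nested defaultdict counters.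
import Mathlib
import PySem

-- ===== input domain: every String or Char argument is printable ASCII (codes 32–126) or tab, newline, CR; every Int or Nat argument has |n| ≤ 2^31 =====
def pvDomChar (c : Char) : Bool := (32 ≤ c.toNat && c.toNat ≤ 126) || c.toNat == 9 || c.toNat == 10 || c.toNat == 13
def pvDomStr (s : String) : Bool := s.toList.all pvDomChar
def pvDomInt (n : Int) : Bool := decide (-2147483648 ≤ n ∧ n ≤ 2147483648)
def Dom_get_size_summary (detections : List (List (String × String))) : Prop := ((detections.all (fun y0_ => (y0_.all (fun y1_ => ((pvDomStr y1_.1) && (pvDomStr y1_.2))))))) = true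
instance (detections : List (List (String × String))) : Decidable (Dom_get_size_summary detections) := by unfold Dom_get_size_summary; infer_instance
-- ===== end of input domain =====

-- B keeps no counting accumulator: it extracts the filtered (class, size) pair list, dedups
-- classes in first-occurrence order, and for each class counts each deduped size with
-- list.count — a dedup-and-count group-by instead of A's nested defaultdict counters
-- (alternative decomposition; B is quadratic, not faster).

-- ===== PORT A =====
def get_size_summary (detections : List (List (String × String))) : List (String × List (String × Int)) :=
  let summary : PySem.Dict String (PySem.Dict String Int) :=
    detections.foldl (fun summary det =>
      let class_name := (PySem.Dict.mk det).getD "class_name" "unknown"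
      let size := (PySem.Dict.mk det).getD "size_variant" "N/A"
      if size == "N/A" then summary
      else summary.modify class_name PySem.Dict.empty (fun inner => inner.modify size 0 (· + 1)))
      PySem.Dict.empty
  summary.items.map (fun kv => (kv.1, kv.2.items))

-- ===== PORT B =====
def get_size_summary_alt (detections : List (List (String × String))) : List (String × List (String × Int)) :=
  let pairs0 := detections.map (fun det =>
    ((PySem.Dict.mk det).getD "class_name" "unknown",
     (PySem.Dict.mk det).getD "size_variant" "N/A"))
  let pairs := pairs0.filter (fun p => p.2 != "N/A")
  -- dict.fromkeys dedup in first-occurrence order = PySem.Set.ofList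
  let classes := PySem.Set.ofList (pairs.map (·.1))
  let result : PySem.Dict String (PySem.Dict String Int) :=
    classes.foldl (fun result c =>
      let sizes := (pairs.filter (fun p => p.1 == c)).map (·.2)
      result.insert c
        ((PySem.Set.ofList sizes).foldl
          (fun d s => d.insert s ((sizes.count s : Int))) PySem.Dict.empty))
      PySem.Dict.empty
  result.items.map (fun kv => (kv.1, kv.2.items))

-- ===== PRECONDITION & SPEC =====
def Spec_get_size_summary (detections : List (List (String × String))) (out : List (String × List (String × Int))) : Prop := out = get_size_summary_alt detections
instance (detections : List (List (String × String))) (out : List (String × List (String × Int))) : Decidable (Spec_get_size_summary detections out) := by unfold Spec_get_size_summary; infer_instance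

-- ===== CLAIM (what is proved, stated in full; the proofs are below) =====
def Claim_equal_get_size_summary : Prop := ∀ (detections : List (List (String × String))), Dom_get_size_summary detections → Spec_get_size_summary detections (get_size_summary detections)

-- ===== LEMMAS AND PROOFS =====

-- the (class_name, size) pairs of the detections that carry a real size
def pvPairs (dets : List (List (String × String))) : List (String × String) :=
  dets.filterMap (fun det =>
    let p := ((PySem.Dict.mk det).getD "class_name" "unknown",
              (PySem.Dict.mk det).getD "size_variant" "N/A")
    if p.2 == "N/A" then none else some p)

-- A's loop as a fold over the pair list
def pvNest (ps : List (String × String)) : PySem.Dict String (PySem.Dict String Int) :=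
  ps.foldl (fun sm p => sm.modify p.1 PySem.Dict.empty (fun inner => inner.modify p.2 0 (· + 1)))
    PySem.Dict.empty

-- the sizes recorded for class c, in order
def pvSizes (ps : List (String × String)) (c : String) : List String :=
  (ps.filter (fun p => p.1 == c)).map (·.2)

theorem pvFoldA (dets : List (List (String × String)))
    (init : PySem.Dict String (PySem.Dict String Int)) :
    dets.foldl (fun summary det =>
      let class_name := (PySem.Dict.mk det).getD "class_name" "unknown"
      let size := (PySem.Dict.mk det).getD "size_variant" "N/A"
      if size == "N/A" then summary
      else summary.modify class_name PySem.Dict.empty (fun inner => inner.modify size 0 (· + 1)))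
      init
    = (pvPairs dets).foldl
        (fun sm p => sm.modify p.1 PySem.Dict.empty (fun inner => inner.modify p.2 0 (· + 1)))
        init := by
  induction dets generalizing init with
  | nil => rfl
  | cons d t ih =>
      simp only [pvPairs, List.foldl_cons, List.filterMap_cons] at ih ⊢
      by_cases h : (PySem.Dict.mk d).getD "size_variant" "N/A" = "N/A" <;>
        simp only [h, beq_self_eq_true, if_pos, beq_iff_eq, ite_false] <;>
        simpa [h] using ih _

-- B's map-then-filter pair list is the filterMap pvPairs
theorem pvPairsB (dets : List (List (String × String))) :
    ((dets.map (fun det =>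
        ((PySem.Dict.mk det).getD "class_name" "unknown",
         (PySem.Dict.mk det).getD "size_variant" "N/A"))).filter
      (fun p => p.2 != "N/A"))
    = pvPairs dets := by
  induction dets with
  | nil => rfl
  | cons d t ih =>
      simp only [pvPairs, List.map_cons, List.filter_cons, List.filterMap_cons] at ih ⊢
      by_cases h : (PySem.Dict.mk d).getD "size_variant" "N/A" = "N/A" <;> simp [h, ih]

theorem pvGetD_foldl_modify {α κ ν : Type} [DecidableEq κ] [BEq κ] [LawfulBEq κ]
    (l : List α) (key : α → κ) (d0 : ν) (f : α → ν → ν) (d : PySem.Dict κ ν) (c : κ) :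
    (l.foldl (fun d a => d.modify (key a) d0 (f a)) d).getD c d0
      = (l.filter (fun a => key a == c)).foldl (fun v a => f a v) (d.getD c d0) := by
  induction l generalizing d with
  | nil => rfl
  | cons a t ih =>
      simp only [List.foldl_cons, List.filter_cons]
      by_cases h : key a = c
      · simp [h, ih]
      · simp [h, ih, PySem.Dict.getD_modify, Ne.symm h]

theorem pvInsert_fold_eq_counter (ss : List String) :
    (PySem.Set.ofList ss).foldl (fun v s => v.insert s ((ss.count s : Int))) PySem.Dict.empty
      = PySem.Dict.counter ss := by
  apply PySem.Dict.ext
  have h := PySem.Dict.items_foldl_insert_fresh (PySem.Set.ofList ss) (fun s => s)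
      (fun s => ((ss.count s : Int))) PySem.Dict.empty
      (fun a _ => PySem.Dict.contains_empty a)
      (by simpa using PySem.Set.nodup_ofList ss)
  simpa [PySem.Dict.items_counter, PySem.Dict.empty] using h

theorem pvNest_getD (ps : List (String × String)) (c : String) :
    (pvNest ps).getD c PySem.Dict.empty = PySem.Dict.counter (pvSizes ps c) := by
  rw [pvNest, pvGetD_foldl_modify ps (fun p => p.1) PySem.Dict.empty
      (fun p inner => inner.modify p.2 0 (· + 1)) PySem.Dict.empty c,
    PySem.Dict.getD_empty]
  rw [pvSizes, PySem.Dict.counter_eq_foldl, List.foldl_map]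

theorem pvNest_keys (ps : List (String × String)) :
    (pvNest ps).keys = PySem.Set.ofList (ps.map (·.1)) := by
  rw [pvNest, PySem.Dict.keys_foldl_modify_key]
  simp [PySem.Set.update_nil_left]

-- ===== VERDICT (by name: the statement is the Claim_ definition above) =====
theorem get_size_summary_spec : Claim_equal_get_size_summary := by
  intro detections _
  show get_size_summary detections = get_size_summary_alt detections
  rw [get_size_summary, get_size_summary_alt, pvFoldA, pvPairsB]
  show (pvNest (pvPairs detections)).items.map (fun kv => (kv.1, kv.2.items))
      = (((PySem.Set.ofList ((pvPairs detections).map (·.1))).foldl (fun result c =>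
            result.insert c
              (((PySem.Set.ofList (pvSizes (pvPairs detections) c))).foldl
                (fun d s => d.insert s (((pvSizes (pvPairs detections) c).count s : Int)))
                PySem.Dict.empty))
          PySem.Dict.empty).items).map (fun kv => (kv.1, kv.2.items))
  have hB := PySem.Dict.items_foldl_insert_fresh
      (PySem.Set.ofList ((pvPairs detections).map (·.1))) (fun c => c)
      (fun c => ((PySem.Set.ofList (pvSizes (pvPairs detections) c))).foldl
        (fun d s => d.insert s (((pvSizes (pvPairs detections) c).count s : Int)))
        PySem.Dict.empty)
      PySem.Dict.empty
      (fun a _ => PySem.Dict.contains_empty a)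
      (by simpa using PySem.Set.nodup_ofList ((pvPairs detections).map (·.1)))
  rw [hB]
  rw [PySem.Dict.items_eq_map_keys _ (by rw [pvNest_keys]; exact PySem.Set.nodup_ofList _)
      PySem.Dict.empty, pvNest_keys]
  have hemp : (PySem.Dict.empty : PySem.Dict String (PySem.Dict String Int)).items = [] := rfl
  rw [hemp, List.nil_append, List.map_map, List.map_map]
  apply List.map_congr_left
  intro c _
  simp only [Function.comp_apply]
  rw [pvNest_getD, pvInsert_fold_eq_counter]
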